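-- pv_equiv track=rewrite | github.com/nishanthCACS/Cancer-protein-functional-detection | PDB_Gene_Mapping/spring_2019/MSMS/after_success/class_probabilty_weigtht_initialize_gene_from_PDB_seq_length_clean.py | select_pdb_with_high_length
-- ===== SOURCE A (Python) =====
-- import copy
--
-- def select_pdb_with_high_length(un_overlap):
--     """
--     This function only used by Method_1
--     This function select the PDB length has highest sequence length from the given un_overlap
--
--     other function add 1 to the higher length
--     """
--     high_length = 0
--     for i in range(0,len(un_overlap)):
--        if un_overlap[i][1]-un_overlap[i][0] > high_length:
--            high_length = un_overlap[i][1]-un_overlap[i][0]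
--            sel_PDB_id =  copy.deepcopy(i)
--     if high_length == 0:
--         return high_length, 0
--     else:
--         return high_length, sel_PDB_id
-- ===== SOURCE B (Python) =====
-- def select_pdb_with_high_length(un_overlap):
--     lengths = [x[1] - x[0] for x in un_overlap]
--     high = max(lengths, default=0)
--     if high <= 0:
--         return 0, 0
--     return high, lengths.index(high)
-- ===== Notes on version B (the rewrite author's own statement) =====
-- stated objective: simpler
-- what changed: Replaces the running-max loop with explicit index bookkeeping by a build-lengths comprehension, a separate max() reduction, and a first-occurrence lengths.index() scan.
import Mathlib
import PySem

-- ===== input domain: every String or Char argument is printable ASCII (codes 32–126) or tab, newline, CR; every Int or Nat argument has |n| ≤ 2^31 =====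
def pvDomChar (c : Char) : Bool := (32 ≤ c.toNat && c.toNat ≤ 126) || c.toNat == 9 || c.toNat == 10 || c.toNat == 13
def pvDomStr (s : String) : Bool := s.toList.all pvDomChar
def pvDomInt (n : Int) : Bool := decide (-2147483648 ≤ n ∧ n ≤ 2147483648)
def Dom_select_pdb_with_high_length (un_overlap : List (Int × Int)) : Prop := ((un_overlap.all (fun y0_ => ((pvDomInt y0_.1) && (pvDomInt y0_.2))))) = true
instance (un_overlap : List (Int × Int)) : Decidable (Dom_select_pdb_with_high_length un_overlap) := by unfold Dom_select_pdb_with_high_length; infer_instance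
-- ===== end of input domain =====

-- B rewrites A's running-max loop as a lengths comprehension + max() reduction + first-index scan (simpler decomposition; same cost).


-- ===== PORT A =====
-- A's `for i in range(0, len(un_overlap))` loop carrying (high_length, sel_PDB_id),
-- ported as the obvious structural recursion over the list with the running index i.
def pvGoA : List (Int × Int) → Nat → Int × Int → Int × Int
  | [], _, st => st
  | x :: xs, i, st =>
      pvGoA xs (i + 1) (if x.2 - x.1 > st.1 then (x.2 - x.1, (i : Int)) else st)

def select_pdb_with_high_length (un_overlap : List (Int × Int)) : Int × Int :=
  let st := pvGoA un_overlap 0 (0, 0)   -- sel_PDB_id unset initially; only read when high_length ≠ 0, i.e. after being set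
  if st.1 = 0 then (st.1, 0) else (st.1, st.2)

-- ===== PORT B =====
def select_pdb_with_high_length_alt (un_overlap : List (Int × Int)) : Int × Int :=
  let lengths := un_overlap.map (fun x => x.2 - x.1)
  let high := (PySem.List.max? lengths (fun y => y)).getD 0   -- max(lengths, default=0)
  if high ≤ 0 then (0, 0)
  else (high, ((PySem.List.index? lengths high).getD 0 : Nat))

-- ===== PRECONDITION & SPEC =====
def Spec_select_pdb_with_high_length (un_overlap : List (Int × Int)) (out : Int × Int) : Prop := out = select_pdb_with_high_length_alt un_overlap
instance (un_overlap : List (Int × Int)) (out : Int × Int) : Decidable (Spec_select_pdb_with_high_length un_overlap out) := by unfold Spec_select_pdb_with_high_length; infer_instance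

-- ===== CLAIM (what is proved, stated in full; the proofs are below) =====
def Claim_equal_select_pdb_with_high_length : Prop := ∀ (un_overlap : List (Int × Int)), Dom_select_pdb_with_high_length un_overlap → Spec_select_pdb_with_high_length un_overlap (select_pdb_with_high_length un_overlap)

-- ===== LEMMAS AND PROOFS =====

-- A's loop, viewed over the list of lengths only (proof-side helper).
def pvGoI : List Int → Nat → Int × Int → Int × Int
  | [], _, st => st
  | a :: t, i, st => pvGoI t (i + 1) (if a > st.1 then (a, (i : Int)) else st)

lemma pvGoA_eq_goI (xs : List (Int × Int)) : ∀ (k : Nat) (st : Int × Int),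
    pvGoA xs k st = pvGoI (xs.map (fun x => x.2 - x.1)) k st := by
  induction xs with
  | nil => intro k st; rfl
  | cons x xs ih => intro k st; simp only [pvGoA, List.map_cons, pvGoI, ih]

lemma foldl_max_comm (t : List Int) : ∀ a b : Int, t.foldl max (max a b) = max a (t.foldl max b) := by
  induction t with
  | nil => intro a b; simp
  | cons y t ih =>
      intro a b
      simp only [List.foldl_cons]
      rw [max_assoc, ih]

-- characterisation of A's loop in terms of B's pieces
lemma pvGoI_spec (L : List Int) : ∀ (k : Nat) (h s : Int),
    pvGoI L k (h, s) =
      match PySem.List.max? L (fun y => y) with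
      | none => (h, s)
      | some M =>
          if h < M then (M, (k : Int) + ((PySem.List.index? L M).getD 0 : Nat))
          else (h, s) := by
  induction L with
  | nil => intro k h s; simp [pvGoI, PySem.List.max?]
  | cons a t ih =>
      intro k h s
      have hmaxcons : PySem.List.max? (a :: t) (fun y => y) = some (t.foldl max a) :=
        PySem.List.max?_id_cons a t
      rcases hL : PySem.List.max? t (fun y => y) with _ | M'
      · -- tail empty
        have ht : t = [] := (PySem.List.max?_eq_none_iff _ _).mp hL
        subst ht
        simp only [pvGoI, hmaxcons, List.foldl_nil]
        by_cases hc : a > h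
        · rw [if_pos hc, if_pos hc, PySem.List.index?_cons_self]
          simp
        · rw [if_neg hc, if_neg hc]
      · -- tail has maximum M'
        have hM'mem : M' ∈ t := PySem.List.max?_mem hL
        obtain ⟨j, hj⟩ := Option.isSome_iff_exists.mp ((PySem.List.index?_isSome_iff t M').mpr hM'mem)
        have hfold : t.foldl max a = max a M' := by
          rcases t with _ | ⟨y, u⟩
          · simp_all
          · rw [PySem.List.max?_id_cons y u] at hL
            injection hL with hL
            simp only [List.foldl_cons]
            rw [← hL, ← foldl_max_comm]
        simp only [pvGoI, hmaxcons, hfold]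
        by_cases hc : a > h
        · rw [if_pos hc, ih (k + 1) a (k : Int), hL]
          by_cases hc2 : a < M'
          · have hne : a ≠ M' := ne_of_lt hc2
            have hmax : max a M' = M' := max_eq_right (le_of_lt hc2)
            have hidx : PySem.List.index? (a :: t) M' = some (j + 1) := by
              rw [PySem.List.index?_cons_of_ne t hne, hj]; rfl
            have hlt : h < M' := lt_trans hc hc2
            simp only [hmax, if_pos hc2, if_pos hlt, hidx, hj, Option.getD_some,
              Prod.mk.injEq, true_and]
            push_cast; ring
          · have hmax : max a M' = a := max_eq_left (le_of_not_gt hc2)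
            have hidx : PySem.List.index? (a :: t) a = some 0 := PySem.List.index?_cons_self a t
            simp only [hmax, if_neg hc2, if_pos hc, hidx, Option.getD_some]
            simp
        · have hah : a ≤ h := le_of_not_gt hc
          rw [if_neg hc, ih (k + 1) h s, hL]
          by_cases hc2 : h < M'
          · have hne : a ≠ M' := ne_of_lt (lt_of_le_of_lt hah hc2)
            have hmax : max a M' = M' := max_eq_right (le_of_lt (lt_of_le_of_lt hah hc2))
            have hidx : PySem.List.index? (a :: t) M' = some (j + 1) := by
              rw [PySem.List.index?_cons_of_ne t hne, hj]; rfl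
            simp only [hmax, if_pos hc2, hidx, hj, Option.getD_some, Prod.mk.injEq, true_and]
            push_cast; ring
          · have hmax : ¬ h < max a M' := by
              rcases max_cases a M' with ⟨he, _⟩ | ⟨he, _⟩ <;> rw [he]
              · exact fun hlt => hc hlt
              · exact hc2
            simp only [if_neg hc2, if_neg hmax]

theorem select_pdb_with_high_length_spec : Claim_equal_select_pdb_with_high_length := by
  intro l _
  unfold Spec_select_pdb_with_high_length select_pdb_with_high_length select_pdb_with_high_length_alt
  simp only
  rw [pvGoA_eq_goI l 0 (0, 0), pvGoI_spec (l.map (fun x => x.2 - x.1)) 0 0 0]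
  rcases hL : PySem.List.max? (l.map (fun x => x.2 - x.1)) (fun y => y) with _ | M
  · simp [hL]
  · by_cases hM : (0 : Int) < M
    · have hne : M ≠ 0 := ne_of_gt hM
      have hle : ¬ M ≤ 0 := not_le.mpr hM
      simp [hL, hM, hne, hle]
    · have hle : M ≤ 0 := le_of_not_gt hM
      simp [hL, hM, hle]
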